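-- pv_equiv track=rewrite | github.com/rain2473/coding-test | 프로그래머스/lv2/17679. ［1차］ 프렌즈4블록/［1차］ 프렌즈4블록.py | exe
-- ===== SOURCE A (Python) =====
-- def exe(m, n, answer, board_t):
--     memory = []
--     for x in range(n-1):
--         col1 = board_t[x]
--         col2 = board_t[x+1]
--         for y in range(m-1):
--             tmp = set([col1[y],col1[y+1],col2[y],col2[y+1]])
--             if len(tmp) == 1 and tmp != set([" "]):
--                 memory.append([x,y])
--     for x, y in memory:
--         board_t[x][y], board_t[x][y+1], board_t[x+1][y], board_t[x+1][y+1] = "0","0","0","0"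
--     for col in range(len(board_t)):
--         answer += board_t[col].count("0")
--         tmp = "".join(board_t[col]).replace("0","")
--         tmp = " " * (len(board_t[col])-len(tmp)) + tmp
--         board_t[col] = list(tmp)
--     return board_t, answer
-- ===== SOURCE B (Python) =====
-- def exe(m, n, answer, board_t):
--     # Ask each cell directly whether one of the (up to four) 2x2 windows that
--     # contain it is a uniform non-blank match, then rebuild every column in one
--     # comprehension: clear matched cells, drop cleared cells, right-justify.
--     def matched(i, j):
--         v = board_t[i][j]
--         return v != " " and v == board_t[i][j + 1] == board_t[i + 1][j] == board_t[i + 1][j + 1]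
--
--     def covered(x, y):
--         return any(matched(i, j)
--                    for i in (x - 1, x) if 0 <= i < n - 1
--                    for j in (y - 1, y) if 0 <= j < m - 1)
--
--     result = []
--     for x, col in enumerate(board_t):
--         cleared = ["0" if covered(x, y) else v for y, v in enumerate(col)]
--         answer += cleared.count("0")
--         chars = "".join(cleared).replace("0", "")
--         result.append(list(chars.rjust(len(col))))
--     return result, answer
-- ===== Notes on version B (the rewrite author's own statement) =====
-- stated objective: simpler
-- what changed: B inverts A's control flow: instead of collecting matched 2x2 corners into a memory list and then destructively overwriting all four cells of each match with "0" before a final collapse loop, B asks each cell directly whether any of the up-to-four 2x2 windows containing it is a uniform non-blank match and rebuilds each column in a single comprehension (clear covered cells, count and drop cleared cells, right-justify), never mutating the board.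
import Mathlib
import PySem

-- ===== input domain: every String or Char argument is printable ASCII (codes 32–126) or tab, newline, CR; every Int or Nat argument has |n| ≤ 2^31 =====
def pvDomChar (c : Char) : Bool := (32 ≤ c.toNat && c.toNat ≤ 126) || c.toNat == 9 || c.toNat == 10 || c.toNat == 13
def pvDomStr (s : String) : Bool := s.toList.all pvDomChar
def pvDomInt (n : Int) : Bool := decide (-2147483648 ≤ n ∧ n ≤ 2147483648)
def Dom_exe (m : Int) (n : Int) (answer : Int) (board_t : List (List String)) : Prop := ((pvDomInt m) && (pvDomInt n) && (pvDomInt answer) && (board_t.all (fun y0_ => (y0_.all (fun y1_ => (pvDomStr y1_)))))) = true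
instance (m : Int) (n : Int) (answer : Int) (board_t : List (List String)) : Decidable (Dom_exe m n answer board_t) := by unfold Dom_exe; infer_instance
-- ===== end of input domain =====

-- B replaces A's staged match-list collection + destructive in-place marking by a direct
-- per-cell coverage test and one per-column rebuild comprehension (objective: simpler).
-- A mutates board_t in place in Python; the equivalence proved here is about the RETURN
-- value only (B does not mutate its argument).

-- ===== PORT A =====
-- the 2x2 scan of A: memory of matched top-left corners
def exeScan (m : Int) (n : Int) (board_t : List (List String)) : List (Int × Int) :=
  (PySem.List.pyRange 0 (n-1) 1).foldl (fun mem x =>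
    let col1 := PySem.List.pyGetD board_t x []
    let col2 := PySem.List.pyGetD board_t (x+1) []
    (PySem.List.pyRange 0 (m-1) 1).foldl (fun mem y =>
      let tmp := PySem.Set.ofList [PySem.List.pyGetD col1 y "", PySem.List.pyGetD col1 (y+1) "",
                                   PySem.List.pyGetD col2 y "", PySem.List.pyGetD col2 (y+1) ""]
      if tmp.length == 1 && !(PySem.Set.equal tmp (PySem.Set.ofList [" "])) then mem ++ [(x, y)]
      else mem) mem) []

-- board_t[x][y] = board_t[x][y+1] = board_t[x+1][y] = board_t[x+1][y+1] = "0";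
-- x and y come from range(...), hence are ≥ 0, so Int.toNat is exact here
def exeMark (b : List (List String)) (p : Int × Int) : List (List String) :=
  (b.modify p.1.toNat (fun col => (col.set p.2.toNat "0").set (p.2 + 1).toNat "0")).modify
    (p.1 + 1).toNat (fun col => (col.set p.2.toNat "0").set (p.2 + 1).toNat "0")

-- the third loop of A: count "0" cells, join, strip '0' chars, pad with spaces, re-split into chars
def exeCollapse : List (List String) → Int → List (List String) × Int
  | [], ans => ([], ans)
  | col :: rest, ans =>
    let ans1 := ans + (PySem.List.count col "0" : Int)
    let tmp := (PySem.Str.replace (PySem.Str.join "" col) "0" "").toList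
    -- " " * k: Python clamps a negative repetition count to "", exactly as Nat subtraction does
    let newcol := (List.replicate (col.length - tmp.length) ' ' ++ tmp).map (fun ch => String.ofList [ch])
    let r := exeCollapse rest ans1
    (newcol :: r.1, r.2)

def exe (m : Int) (n : Int) (answer : Int) (board_t : List (List String)) : List (List String) × Int :=
  exeCollapse ((exeScan m n board_t).foldl exeMark board_t) answer

-- ===== PORT B =====
-- matched(i, j) of Source B
def altMatched (board_t : List (List String)) (i j : Int) : Bool :=
  let v := PySem.List.pyGetD (PySem.List.pyGetD board_t i []) j ""
  decide (v ≠ " " ∧ v = PySem.List.pyGetD (PySem.List.pyGetD board_t i []) (j+1) ""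
    ∧ v = PySem.List.pyGetD (PySem.List.pyGetD board_t (i+1) []) j ""
    ∧ v = PySem.List.pyGetD (PySem.List.pyGetD board_t (i+1) []) (j+1) "")

-- covered(x, y) of Source B: any of the four 2x2 windows that could contain (x, y) is a match
def altCovered (m : Int) (n : Int) (board_t : List (List String)) (x y : Int) : Bool :=
  ([x - 1, x].filter (fun i => decide (0 ≤ i ∧ i < n - 1))).any (fun i =>
    ([y - 1, y].filter (fun j => decide (0 ≤ j ∧ j < m - 1))).any (fun j =>
      altMatched board_t i j))

-- the loop body of Source B; chars.rjust(len(col)) is ported by hand as left-padding with spaces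
-- (exact: rjust pads on the left to the given width and leaves longer strings unchanged,
-- exactly as Nat subtraction in the replicate count does)
def exe_alt (m : Int) (n : Int) (answer : Int) (board_t : List (List String)) : List (List String) × Int :=
  (PySem.List.enumerate board_t 0).foldl (fun acc p =>
    let cleared := (PySem.List.enumerate p.2 0).map (fun q =>
      if altCovered m n board_t p.1 q.1 then "0" else q.2)
    let chars := (PySem.Str.replace (PySem.Str.join "" cleared) "0" "").toList
    (acc.1 ++ [(List.replicate (p.2.length - chars.length) ' ' ++ chars).map (fun ch => String.ofList [ch])],
     acc.2 + (PySem.List.count cleared "0" : Int)))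
    (([] : List (List String)), answer)

-- ===== PRECONDITION & SPEC =====
-- Pre_exe excludes exactly the inputs on which Python A raises IndexError:
-- n ≥ 2 with fewer than n columns, or n ≥ 2 and m ≥ 2 with an accessed column shorter than m.
def Pre_exe (m : Int) (n : Int) (answer : Int) (board_t : List (List String)) : Prop :=
  2 ≤ n → ((n ≤ (board_t.length : Int)) ∧ (2 ≤ m → ∀ col ∈ board_t.take n.toNat, m ≤ (col.length : Int)))
instance (m : Int) (n : Int) (answer : Int) (board_t : List (List String)) : Decidable (Pre_exe m n answer board_t) := by unfold Pre_exe; infer_instance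
def pvWitness_exe : Int × Int × Int × List (List String) := (2, 2, 0, [["A", "A"], ["A", "A"]])
def Spec_exe (m : Int) (n : Int) (answer : Int) (board_t : List (List String)) (out : List (List String) × Int) : Prop := out = exe_alt m n answer board_t
instance (m : Int) (n : Int) (answer : Int) (board_t : List (List String)) (out : List (List String) × Int) : Decidable (Spec_exe m n answer board_t out) := by unfold Spec_exe; infer_instance

-- ===== CLAIM (what is proved, stated in full; the proofs are below) =====
def Claim_equal_exe : Prop := ∀ (m : Int) (n : Int) (answer : Int) (board_t : List (List String)), Dom_exe m n answer board_t → Pre_exe m n answer board_t → Spec_exe m n answer board_t (exe m n answer board_t)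

-- ===== LEMMAS AND PROOFS =====

-- A's memory in closed form (altMatched is exactly A's match condition, see cond_eq)
def memList (m : Int) (n : Int) (board : List (List String)) : List (Int × Int) :=
  (PySem.List.pyRange 0 (n-1) 1).flatMap (fun x =>
    ((PySem.List.pyRange 0 (m-1) 1).filter (fun y => altMatched board x y)).map (fun y => (x, y)))

-- a mark at corner p hits cell (i, j)
def hitP (p : Int × Int) (i j : Nat) : Bool :=
  decide ((i = p.1.toNat ∨ i = p.1.toNat + 1) ∧ (j = p.2.toNat ∨ j = p.2.toNat + 1))

-- cell z is part of some matched 2x2 block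
def CovI (m : Int) (n : Int) (board : List (List String)) (z : Int × Int) : Prop :=
  ∃ x y : Int, (0 ≤ x ∧ x < n - 1) ∧ (0 ≤ y ∧ y < m - 1) ∧ altMatched board x y = true ∧
    z ∈ [(x, y), (x, y+1), (x+1, y), (x+1, y+1)]

theorem cond_eq (a b c d : String) :
    (((PySem.Set.ofList [a,b,c,d]).length == 1) && !(PySem.Set.equal (PySem.Set.ofList [a,b,c,d]) (PySem.Set.ofList [" "])))
    = decide (a ≠ " " ∧ a = b ∧ a = c ∧ a = d) := by
  by_cases h : a = b ∧ a = c ∧ a = d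
  · obtain ⟨h1, h2, h3⟩ := h
    subst h1; subst h2; subst h3
    have e : PySem.Set.ofList [a,a,a,a] = [a] := by
      simp [PySem.Set.ofList, PySem.Set.add, PySem.Set.empty]
    rw [e]
    by_cases ha : a = " "
    · subst ha; simp [PySem.Set.equal, PySem.Set.issubset, PySem.Set.ofList, PySem.Set.add, PySem.Set.empty]
    · simp [PySem.Set.equal, PySem.Set.issubset, PySem.Set.ofList, PySem.Set.add, PySem.Set.empty, ha]
  · have hlen : (PySem.Set.ofList [a,b,c,d]).length ≠ 1 := by
      intro hl
      obtain ⟨e, he⟩ := List.length_eq_one_iff.mp hl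
      have ha : a ∈ PySem.Set.ofList [a,b,c,d] := by rw [PySem.Set.mem_ofList]; simp
      have hb : b ∈ PySem.Set.ofList [a,b,c,d] := by rw [PySem.Set.mem_ofList]; simp
      have hc : c ∈ PySem.Set.ofList [a,b,c,d] := by rw [PySem.Set.mem_ofList]; simp
      have hd : d ∈ PySem.Set.ofList [a,b,c,d] := by rw [PySem.Set.mem_ofList]; simp
      rw [he] at ha hb hc hd
      simp at ha hb hc hd
      exact h ⟨ha.trans hb.symm, ha.trans hc.symm, ha.trans hd.symm⟩
    simp [hlen, h]

theorem exeScan_eq (m n : Int) (board : List (List String)) :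
    exeScan m n board = memList m n board := by
  unfold exeScan memList
  simp only [cond_eq, PySem.List.foldl_append_if, PySem.List.foldl_append_eq_flatMap, List.nil_append, altMatched]

theorem mem_memList (m n : Int) (board : List (List String)) (z : Int × Int) :
    z ∈ memList m n board ↔
      ∃ x y : Int, (0 ≤ x ∧ x < n - 1) ∧ (0 ≤ y ∧ y < m - 1) ∧ altMatched board x y = true ∧ z = (x, y) := by
  simp [memList, List.mem_flatMap, List.mem_filter, List.mem_map, PySem.List.mem_pyRange_one]
  tauto

-- cell (i, j) of the marked board
def readCell (b : List (List String)) (i j : Nat) : Option String :=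
  b[i]?.bind (fun col => col[j]?)

theorem set_set_getElem? (col : List String) (Y j : Nat) :
    ((col.set Y "0").set (Y + 1) "0")[j]? = (col[j]?).map (fun v => if j = Y ∨ j = Y + 1 then "0" else v) := by
  by_cases hj1 : j = Y <;> by_cases hj2 : j = Y + 1
  · omega
  · subst hj1
    by_cases hl : j < col.length
    · simp [List.length_set, hl]
    · rw [List.getElem?_eq_none (by simpa [List.length_set] using Nat.le_of_not_lt hl),
        List.getElem?_eq_none (by simpa using Nat.le_of_not_lt hl)]
      rfl
  · subst hj2
    by_cases hl : Y + 1 < col.length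
    · simp [List.length_set, hl]
    · rw [List.getElem?_eq_none (by simpa [List.length_set] using Nat.le_of_not_lt hl),
        List.getElem?_eq_none (by simpa using Nat.le_of_not_lt hl)]
      rfl
  · simp only [List.getElem?_set, List.length_set]
    rw [if_neg (by omega), if_neg (by omega)]
    simp [hj1, hj2]

theorem readCell_mark (p : Int × Int) (hx : 0 ≤ p.1) (hy : 0 ≤ p.2)
    (b : List (List String)) (i j : Nat) :
    readCell (exeMark b p) i j = (readCell b i j).map (fun v => if hitP p i j then "0" else v) := by
  obtain ⟨px, py⟩ := p
  simp only [exeMark, readCell, hitP] at *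
  have hX : (px + 1).toNat = px.toNat + 1 := by omega
  have hY : (py + 1).toNat = py.toNat + 1 := by omega
  rw [hX, hY]
  simp only [List.getElem?_modify]
  cases hcol : b[i]? with
  | none => simp
  | some col =>
    by_cases hi1 : px.toNat = i <;> by_cases hi2 : px.toNat + 1 = i
    · omega
    · simp [← hi1, set_set_getElem?]
    · simp [← hi2, set_set_getElem?]
    · simp [hi1, hi2, show ¬(i = px.toNat ∨ i = px.toNat + 1) from by omega]

theorem readCell_foldl_mark (ops : List (Int × Int)) (hops : ∀ p ∈ ops, 0 ≤ p.1 ∧ 0 ≤ p.2)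
    (b : List (List String)) (i j : Nat) :
    readCell (ops.foldl exeMark b) i j
      = (readCell b i j).map (fun v => if ∃ p ∈ ops, hitP p i j then "0" else v) := by
  induction ops generalizing b with
  | nil => cases h : readCell b i j <;> simp [h]
  | cons q t ih =>
    rw [List.foldl_cons, ih (fun p hp => hops p (List.mem_cons_of_mem q hp)),
      readCell_mark q (hops q (List.mem_cons_self)).1 (hops q (List.mem_cons_self)).2]
    cases h : readCell b i j with
    | none => simp
    | some v =>
      simp only [Option.map_some]
      congr 1
      by_cases h1 : hitP q i j = true <;> by_cases h2 : ∃ p ∈ t, hitP p i j <;>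
        simp [h1, h2, List.mem_cons]

theorem length_foldl_mark (ops : List (Int × Int)) (b : List (List String)) :
    (ops.foldl exeMark b).length = b.length := by
  induction ops generalizing b with
  | nil => rfl
  | cons p t ih => simp [List.foldl_cons, ih, exeMark, List.length_modify]

theorem marked_getElem? (ops : List (Int × Int)) (hops : ∀ p ∈ ops, 0 ≤ p.1 ∧ 0 ≤ p.2)
    (b : List (List String)) (i : Nat) :
    (ops.foldl exeMark b)[i]?
      = (b[i]?).map (fun col => col.zipIdx.map (fun q => if ∃ p ∈ ops, hitP p i q.2 then "0" else q.1)) := by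
  cases h : b[i]? with
  | none =>
    rw [List.getElem?_eq_none (by rw [length_foldl_mark]; exact List.getElem?_eq_none_iff.mp h)]
    rfl
  | some col =>
    have hi : i < (ops.foldl exeMark b).length := by
      rw [length_foldl_mark]; exact (List.getElem?_eq_some_iff.mp h).1
    rw [List.getElem?_eq_getElem hi, Option.map_some]
    congr 1
    apply List.ext_getElem?
    intro j
    have hrc : ((ops.foldl exeMark b)[i]'hi)[j]? = readCell (ops.foldl exeMark b) i j := by
      simp [readCell, List.getElem?_eq_getElem hi]
    rw [hrc, readCell_foldl_mark ops hops, readCell, h]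
    simp only [Option.bind_some, List.getElem?_map, List.getElem?_zipIdx]
    cases hc : col[j]? <;> simp

theorem memList_nonneg (m n : Int) (board : List (List String)) :
    ∀ p ∈ memList m n board, 0 ≤ p.1 ∧ 0 ≤ p.2 := by
  intro p hp
  obtain ⟨x, y, hx, hy, _, rfl⟩ := (mem_memList m n board p).mp hp
  exact ⟨hx.1, hy.1⟩

theorem hit_iff_CovI (m n : Int) (board : List (List String)) (i j : Nat) :
    (∃ p ∈ memList m n board, hitP p i j) ↔ CovI m n board ((i : Int), (j : Int)) := by
  constructor
  · rintro ⟨p, hp, hhit⟩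
    obtain ⟨x, y, hx, hy, hc, rfl⟩ := (mem_memList m n board p).mp hp
    obtain ⟨h1, h2⟩ := of_decide_eq_true hhit
    refine ⟨x, y, hx, hy, hc, ?_⟩
    simp only [List.mem_cons, List.not_mem_nil, or_false, Prod.mk.injEq]
    rcases h1 with h1 | h1 <;> rcases h2 with h2 | h2 <;> [skip; skip; skip; skip] <;> omega
  · rintro ⟨x, y, hx, hy, hc, hz⟩
    refine ⟨(x, y), (mem_memList m n board (x, y)).mpr ⟨x, y, hx, hy, hc, rfl⟩, ?_⟩
    simp only [List.mem_cons, List.not_mem_nil, or_false, Prod.mk.injEq] at hz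
    unfold hitP
    apply decide_eq_true
    rcases hz with ⟨h1, h2⟩ | ⟨h1, h2⟩ | ⟨h1, h2⟩ | ⟨h1, h2⟩ <;> constructor <;> omega

-- B's covered test is exactly membership of the cell in a matched 2x2 block
theorem altCovered_iff (m n : Int) (board : List (List String)) (k j : Nat) :
    altCovered m n board (k : Int) (j : Int) = true ↔ CovI m n board ((k : Int), (j : Int)) := by
  unfold altCovered CovI
  simp only [List.any_eq_true, List.mem_filter, List.mem_cons, List.not_mem_nil,
    or_false, decide_eq_true_eq]
  constructor
  · rintro ⟨i, ⟨hi, hib⟩, j', ⟨hj, hjb⟩, hc⟩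
    refine ⟨i, j', hib, hjb, hc, ?_⟩
    simp only [List.mem_cons, List.not_mem_nil, or_false, Prod.mk.injEq]
    omega
  · rintro ⟨x, y, hx, hy, hc, hz⟩
    simp only [List.mem_cons, List.not_mem_nil, or_false, Prod.mk.injEq] at hz
    exact ⟨x, ⟨by omega, hx⟩, y, ⟨by omega, hy⟩, hc⟩

-- A's per-column transform (the body of exeCollapse)
def colA (col : List String) : List String :=
  let tmp := (PySem.Str.replace (PySem.Str.join "" col) "0" "").toList
  (List.replicate (col.length - tmp.length) ' ' ++ tmp).map (fun ch => String.ofList [ch])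

theorem exeCollapse_eq (cols : List (List String)) (ans : Int) :
    exeCollapse cols ans
      = (cols.map colA, ans + (cols.map (fun c => (PySem.List.count c "0" : Int))).sum) := by
  induction cols generalizing ans with
  | nil => simp [exeCollapse]
  | cons col rest ih =>
    simp only [exeCollapse, ih, List.map_cons, List.sum_cons, colA]
    exact Prod.ext rfl (by push_cast; ring)

-- B's cleared column, in closed form
def clearedB (m n : Int) (board : List (List String)) (p : Int × List String) : List String :=
  (PySem.List.enumerate p.2 0).map (fun q => if altCovered m n board p.1 q.1 then "0" else q.2)

theorem exe_alt_outer (m : Int) (n : Int) (board : List (List String))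
    (l : List (List String)) (s : Int) (acc0 : List (List String)) (z0 : Int) :
    (PySem.List.enumerate l s).foldl (fun acc p =>
        let cleared := (PySem.List.enumerate p.2 0).map (fun q =>
          if altCovered m n board p.1 q.1 then "0" else q.2)
        let chars := (PySem.Str.replace (PySem.Str.join "" cleared) "0" "").toList
        (acc.1 ++ [(List.replicate (p.2.length - chars.length) ' ' ++ chars).map (fun ch => String.ofList [ch])],
         acc.2 + (PySem.List.count cleared "0" : Int))) (acc0, z0)
      = (acc0 ++ (PySem.List.enumerate l s).map (fun p =>
            let chars := (PySem.Str.replace (PySem.Str.join "" (clearedB m n board p)) "0" "").toList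
            (List.replicate (p.2.length - chars.length) ' ' ++ chars).map (fun ch => String.ofList [ch])),
         z0 + ((PySem.List.enumerate l s).map (fun p =>
            (PySem.List.count (clearedB m n board p) "0" : Int))).sum) := by
  induction l generalizing s acc0 z0 with
  | nil => simp [PySem.List.enumerate]
  | cons col rest ih =>
    rw [PySem.List.enumerate_cons, List.foldl_cons, ih]
    simp only [clearedB, List.map_cons, List.sum_cons]
    exact Prod.ext (by simp) (by simp; ring)

theorem exe_alt_eq (m : Int) (n : Int) (answer : Int) (board : List (List String)) :
    exe_alt m n answer board
      = ((PySem.List.enumerate board 0).map (fun p =>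
            let chars := (PySem.Str.replace (PySem.Str.join "" (clearedB m n board p)) "0" "").toList
            (List.replicate (p.2.length - chars.length) ' ' ++ chars).map (fun ch => String.ofList [ch])),
         answer + ((PySem.List.enumerate board 0).map (fun p =>
            (PySem.List.count (clearedB m n board p) "0" : Int))).sum) := by
  show (PySem.List.enumerate board 0).foldl _ (([] : List (List String)), answer) = _
  rw [exe_alt_outer]
  simp

-- B's cleared column of column k is exactly A's marked column of that index
theorem clearedB_eq_marked (m n : Int) (board : List (List String)) (k : Nat) (col : List String) :
    clearedB m n board ((k : Int), col)
      = col.zipIdx.map (fun q => if ∃ p ∈ memList m n board, hitP p k q.2 then "0" else q.1) := by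
  simp only [clearedB, PySem.List.enumerate_eq_zipIdx_map, List.map_map]
  apply List.map_congr_left
  intro q _
  have h : (∃ p ∈ memList m n board, hitP p k q.2) ↔ altCovered m n board (k : Int) (q.2 : Int) = true := by
    rw [hit_iff_CovI, altCovered_iff]
  simp only [Function.comp, zero_add]
  by_cases hc : ∃ p ∈ memList m n board, hitP p k q.2
  · rw [if_pos (h.mp hc), if_pos hc]
  · rw [if_neg (fun hb => hc (h.mpr hb)), if_neg hc]

-- lengths agree, so A's padding count equals B's
theorem clearedB_length (m n : Int) (board : List (List String)) (k : Nat) (col : List String) :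
    (clearedB m n board ((k : Int), col)).length = col.length := by
  simp [clearedB, PySem.List.length_enumerate]

-- ===== VERDICT (by name: the statement is the Claim_ definition above) =====
theorem exe_spec : Claim_equal_exe := by
  intro m n answer board _ _
  show exe m n answer board = exe_alt m n answer board
  unfold exe
  rw [exeScan_eq, exeCollapse_eq, exe_alt_eq]
  refine Prod.ext ?_ ?_
  · show List.map colA ((memList m n board).foldl exeMark board) = _
    apply List.ext_getElem?
    intro k
    rw [List.getElem?_map, List.getElem?_map,
      marked_getElem? (memList m n board) (memList_nonneg m n board) board k,
      PySem.List.getElem?_enumerate]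
    cases h : board[k]? with
    | none => rfl
    | some col =>
      simp only [Option.map_some, Option.some.injEq, zero_add]
      rw [← clearedB_eq_marked]
      unfold colA
      rw [clearedB_length]
  · show answer + (List.map _ ((memList m n board).foldl exeMark board)).sum = _
    congr 1
    apply congrArg List.sum
    apply List.ext_getElem?
    intro k
    rw [List.getElem?_map, List.getElem?_map,
      marked_getElem? (memList m n board) (memList_nonneg m n board) board k,
      PySem.List.getElem?_enumerate]
    cases h : board[k]? with
    | none => rfl
    | some col =>
      simp only [Option.map_some, Option.some.injEq, zero_add]
      rw [← clearedB_eq_marked]
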